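-- pv_equiv track=rewrite | github.com/AVasilkovski/typedb-ops-spine | typedb_ops_spine/schema_apply.py | plan_auto_migrations
-- ===== SOURCE A (Python) =====
-- def compute_transitive_subtypes(parent_of: dict[str, str]) -> dict[str, set[str]]:
--     """Compute the full subtype closure for each supertype."""
--     children_of: dict[str, set[str]] = {}
--     for child, parent in parent_of.items():
--         children_of.setdefault(parent, set()).add(child)
--
--     subtypes: dict[str, set[str]] = {}
--
--     def _all_children(type_label: str) -> set[str]:
--         if type_label in subtypes:
--             return subtypes[type_label]
--
--         children = set(children_of.get(type_label, set()))
--         for child in list(children):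
--             children.update(_all_children(child))
--         subtypes[type_label] = children
--         return children
--
--     for type_label in list(children_of):
--         _all_children(type_label)
--
--     return subtypes
--
-- def plan_auto_migrations(
--     parent_of: dict[str, str],
--     owns_of: dict[str, set[str]],
--     plays_of: dict[str, set[str]],
-- ) -> tuple[list[tuple[str, str]], list[tuple[str, str]]]:
--     """Plan guarded undefines for inherited capability redeclarations."""
--     undefine_owns_specs: list[tuple[str, str]] = []
--     undefine_plays_specs: list[tuple[str, str]] = []
--     subtypes = compute_transitive_subtypes(parent_of)
--
--     for supertype, attrs in owns_of.items():
--         if supertype not in subtypes: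
--             continue
--         for child in subtypes[supertype]:
--             child_attrs = owns_of.get(child, set())
--             for attr in attrs:
--                 if attr in child_attrs:
--                     undefine_owns_specs.append((child, attr))
--
--     for supertype, roles in plays_of.items():
--         if supertype not in subtypes:
--             continue
--         for child in subtypes[supertype]:
--             child_roles = plays_of.get(child, set())
--             for role in roles:
--                 if role in child_roles:
--                     undefine_plays_specs.append((child, role))
--
--     return undefine_owns_specs, undefine_plays_specs
-- ===== SOURCE B (Python) =====
-- def plan_auto_migrations(
--     parent_of: dict[str, str],
--     owns_of: dict[str, set[str]],
--     plays_of: dict[str, set[str]],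
-- ) -> tuple[list[tuple[str, str]], list[tuple[str, str]]]:
--     """Plan guarded undefines for inherited capability redeclarations.
--
--     Lazy variant: no global subtype table is precomputed; the descendant set of
--     each declaring supertype is computed on demand by pure (unmemoized)
--     recursion over the child graph.
--     """
--     children_of: dict[str, set[str]] = {}
--     for child, parent in parent_of.items():
--         children_of.setdefault(parent, set()).add(child)
--
--     def descendants(label: str) -> set[str]:
--         kids = children_of.get(label, set())
--         out = set(kids)
--         for kid in kids:
--             out.update(descendants(kid))
--         return out
--
--     undefine_owns_specs = [
--         (child, attr)
--         for supertype, attrs in owns_of.items()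
--         for child in descendants(supertype)
--         for attr in attrs
--         if attr in owns_of.get(child, set())
--     ]
--     undefine_plays_specs = [
--         (child, role)
--         for supertype, roles in plays_of.items()
--         for child in descendants(supertype)
--         for role in roles
--         if role in plays_of.get(child, set())
--     ]
--     return undefine_owns_specs, undefine_plays_specs
-- ===== Notes on version B (the rewrite author's own statement) =====
-- stated objective: alternative
-- what changed: Replaces the eagerly precomputed, memoized global subtype table (shared-state recursion over all parents plus a membership guard) with on-demand pure recursion: each declaring supertype's descendant set is computed lazily by an unmemoized recursive closure, and the emission loops become comprehensions with no table or guard.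
import Mathlib
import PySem

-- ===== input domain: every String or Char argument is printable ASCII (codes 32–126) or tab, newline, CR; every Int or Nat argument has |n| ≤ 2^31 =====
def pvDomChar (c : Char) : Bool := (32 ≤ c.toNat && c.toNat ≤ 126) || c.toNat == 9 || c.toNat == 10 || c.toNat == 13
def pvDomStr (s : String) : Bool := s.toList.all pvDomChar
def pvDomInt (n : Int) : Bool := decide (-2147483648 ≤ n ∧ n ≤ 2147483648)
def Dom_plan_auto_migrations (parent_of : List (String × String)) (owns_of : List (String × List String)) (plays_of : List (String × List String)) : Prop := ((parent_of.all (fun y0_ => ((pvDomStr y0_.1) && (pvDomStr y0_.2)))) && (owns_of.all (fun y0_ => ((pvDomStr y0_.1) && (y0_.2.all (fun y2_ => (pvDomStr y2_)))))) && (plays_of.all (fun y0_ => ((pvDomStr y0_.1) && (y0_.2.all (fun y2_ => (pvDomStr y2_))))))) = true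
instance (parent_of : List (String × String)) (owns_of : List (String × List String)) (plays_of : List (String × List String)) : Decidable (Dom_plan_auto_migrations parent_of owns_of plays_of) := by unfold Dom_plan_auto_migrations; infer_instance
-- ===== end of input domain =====

-- B computes each supertype's descendant set lazily by pure (unmemoized) recursion instead of
-- A's eagerly precomputed memoized subtype table; same outputs, no speed claim.


-- ===== PORT A =====
-- children_of: for child, parent in parent_of.items(): children_of.setdefault(parent, set()).add(child)
-- (this prepass loop is verbatim identical in A and B, so both ports share it)
def pvChildrenOf (pd : PySem.Dict String String) : PySem.Dict String (PySem.Set String) :=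
  pd.items.foldl
    (fun d cp => d.modify cp.2 PySem.Set.empty (fun s => PySem.Set.add s cp.1))
    PySem.Dict.empty

-- _all_children with the shared memo dict `subtypes`; Nat fuel stands in for Python's unbounded
-- recursion (RecursionError on cyclic input is excluded by Pre_, under which fuel is never exhausted)
def pvAllChildren (co : PySem.Dict String (PySem.Set String)) :
    Nat → String → PySem.Dict String (PySem.Set String) →
    PySem.Set String × PySem.Dict String (PySem.Set String)
  | 0, _, memo => (PySem.Set.empty, memo)
  | Nat.succ f, t, memo =>
    match memo.get? t with
    | some s => (s, memo)                                    -- if type_label in subtypes: return subtypes[type_label]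
    | none =>
      let kids := co.getD t PySem.Set.empty
      let init : PySem.Set String := PySem.Set.ofList kids   -- children = set(children_of.get(type_label, set()))
      let res := init.foldl                                   -- for child in list(children): children.update(_all_children(child))
        (fun acc c =>
          let r := pvAllChildren co f c acc.2
          (PySem.Set.update acc.1 r.1, r.2)) (init, memo)
      (res.1, res.2.insert t res.1)                          -- subtypes[type_label] = children

-- compute_transitive_subtypes: for type_label in list(children_of): _all_children(type_label)
def pvComputeSubtypes (pd : PySem.Dict String String) (fuel : Nat) :
    PySem.Dict String (PySem.Set String) :=
  let co := pvChildrenOf pd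
  co.keys.foldl (fun memo t => (pvAllChildren co fuel t memo).2) PySem.Dict.empty

def plan_auto_migrations (parent_of : List (String × String)) (owns_of : List (String × List String)) (plays_of : List (String × List String)) : (List (String × String)) × (List (String × String)) :=
  let pd := PySem.Dict.ofList parent_of
  let od := PySem.Dict.ofList owns_of
  let ld := PySem.Dict.ofList plays_of
  let subtypes := pvComputeSubtypes pd (parent_of.length + 1)
  let owns := od.items.foldl
    (fun acc sp =>
      if subtypes.contains sp.1 then                          -- if supertype not in subtypes: continue
        (subtypes.getD sp.1 PySem.Set.empty).foldl            -- for child in subtypes[supertype]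
          (fun acc2 child =>
            sp.2.foldl                                        -- for attr in attrs
              (fun acc3 attr =>
                if (od.getD child PySem.Set.empty).contains attr then acc3 ++ [(child, attr)]
                else acc3) acc2) acc
      else acc) []
  let plays := ld.items.foldl
    (fun acc sp =>
      if subtypes.contains sp.1 then
        (subtypes.getD sp.1 PySem.Set.empty).foldl
          (fun acc2 child =>
            sp.2.foldl
              (fun acc3 role =>
                if (ld.getD child PySem.Set.empty).contains role then acc3 ++ [(child, role)]
                else acc3) acc2) acc
      else acc) []
  (owns, plays)

-- ===== PORT B =====
-- descendants(label): pure unmemoized recursion; same fuel convention as A's port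
def pvDescend (co : PySem.Dict String (PySem.Set String)) : Nat → String → PySem.Set String
  | 0, _ => PySem.Set.empty
  | Nat.succ f, t =>
    let kids := co.getD t PySem.Set.empty                    -- kids = children_of.get(label, set())
    kids.foldl (fun out c => PySem.Set.update out (pvDescend co f c))
      (PySem.Set.ofList kids)                                -- out = set(kids); for kid in kids: out.update(descendants(kid))

def plan_auto_migrations_alt (parent_of : List (String × String)) (owns_of : List (String × List String)) (plays_of : List (String × List String)) : (List (String × String)) × (List (String × String)) :=
  let co := pvChildrenOf (PySem.Dict.ofList parent_of)
  let fuel := parent_of.length + 1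
  let od := PySem.Dict.ofList owns_of
  let ld := PySem.Dict.ofList plays_of
  let owns := od.items.flatMap (fun sp =>                    -- [(child, attr) for supertype, attrs in owns_of.items()
    (pvDescend co fuel sp.1).flatMap (fun child =>           --   for child in descendants(supertype)
      (sp.2.filter (fun attr => (od.getD child PySem.Set.empty).contains attr)).map
        (fun attr => (child, attr))))                        --   for attr in attrs if attr in owns_of.get(child, set())]
  let plays := ld.items.flatMap (fun sp =>
    (pvDescend co fuel sp.1).flatMap (fun child =>
      (sp.2.filter (fun role => (ld.getD child PySem.Set.empty).contains role)).map
        (fun role => (child, role))))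
  (owns, plays)

-- ===== PRECONDITION & SPEC =====
-- pvPChain pd n x = the first n steps of the parent chain above x
def pvPChain (pd : PySem.Dict String String) : Nat → String → List String
  | 0, _ => []
  | Nat.succ n, x =>
    match pd.get? x with
    | none => []
    | some p => p :: pvPChain pd n p

-- Pre_ excludes exactly the inputs whose parent_of relation is cyclic: there Python A never
-- returns (RecursionError from the unbounded recursion of _all_children).
def Pre_plan_auto_migrations (parent_of : List (String × String)) (owns_of : List (String × List String)) (plays_of : List (String × List String)) : Prop :=
  ∀ cp ∈ parent_of, cp.1 ∉ pvPChain (PySem.Dict.ofList parent_of) (parent_of.length + 1) cp.1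
instance (parent_of : List (String × String)) (owns_of : List (String × List String)) (plays_of : List (String × List String)) : Decidable (Pre_plan_auto_migrations parent_of owns_of plays_of) := by unfold Pre_plan_auto_migrations; infer_instance

def pvWitness_plan_auto_migrations : (List (String × String)) × (List (String × List String)) × (List (String × List String)) :=
  ([("b", "a"), ("c", "b")], [("a", ["x", "y"]), ("c", ["x"])], [("a", ["r"]), ("b", ["r"])])

def Spec_plan_auto_migrations (parent_of : List (String × String)) (owns_of : List (String × List String)) (plays_of : List (String × List String)) (out : (List (String × String)) × (List (String × String))) : Prop := out = plan_auto_migrations_alt parent_of owns_of plays_of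
instance (parent_of : List (String × String)) (owns_of : List (String × List String)) (plays_of : List (String × List String)) (out : (List (String × String)) × (List (String × String))) : Decidable (Spec_plan_auto_migrations parent_of owns_of plays_of out) := by unfold Spec_plan_auto_migrations; infer_instance

-- ===== CLAIM (what is proved, stated in full; the proofs are below) =====
def Claim_equal_plan_auto_migrations : Prop := ∀ (parent_of : List (String × String)) (owns_of : List (String × List String)) (plays_of : List (String × List String)), Dom_plan_auto_migrations parent_of owns_of plays_of → Pre_plan_auto_migrations parent_of owns_of plays_of → Spec_plan_auto_migrations parent_of owns_of plays_of (plan_auto_migrations parent_of owns_of plays_of)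

-- ===== LEMMAS AND PROOFS =====

-- abbreviations used only by the proofs
def pvPd (po : List (String × String)) : PySem.Dict String String := PySem.Dict.ofList po
def pvCoOf (po : List (String × String)) : PySem.Dict String (PySem.Set String) := pvChildrenOf (pvPd po)

-- a list x0 :: x1 :: … is "linked" when each element's parent (in pvPd po) is the next element
def pvLinked (pd : PySem.Dict String String) : List String → Prop
  | [] => True
  | [_] => True
  | a :: b :: l => pd.get? a = some b ∧ pvLinked pd (b :: l)

-- every memo entry already equals the pure closure
def pvGood (po : List (String × String)) (memo : PySem.Dict String (PySem.Set String)) : Prop :=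
  ∀ k v, memo.get? k = some v → v = pvDescend (pvCoOf po) (po.length + 1) k

theorem pv_childfold (l : List (String × String)) :
    ∀ (d : PySem.Dict String (PySem.Set String)),
      (l.map Prod.fst).Nodup →
      (∀ p c, c ∈ d.getD p PySem.Set.empty → c ∉ l.map Prod.fst) →
      ∀ p, (l.foldl (fun d cp => d.modify cp.2 PySem.Set.empty (fun s => PySem.Set.add s cp.1)) d).getD p PySem.Set.empty
        = d.getD p PySem.Set.empty ++ (l.filter (fun cp => cp.2 == p)).map Prod.fst := by
  induction l with
  | nil => intro d _ _ p; simp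
  | cons cq tl ih =>
    intro d hnd hfresh p
    obtain ⟨c, q⟩ := cq
    simp only [List.map_cons, List.nodup_cons] at hnd
    have hcd : ∀ p', (d.modify q PySem.Set.empty (fun s => PySem.Set.add s c)).getD p' PySem.Set.empty
        = if p' = q then (d.getD q PySem.Set.empty) ++ [c] else d.getD p' PySem.Set.empty := by
      intro p'
      rw [PySem.Dict.getD_modify]
      have hnm : c ∉ d.getD q PySem.Set.empty := fun hm => hfresh q c hm (by simp)
      rw [PySem.Set.add_of_not_mem hnm]
    simp only [List.foldl_cons]
    rw [ih _ hnd.2 ?fresh p]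
    case fresh =>
      intro p' c' hc'
      rw [hcd p'] at hc'
      by_cases hpq : p' = q
      · rw [if_pos hpq] at hc'
        rcases List.mem_append.mp hc' with h | h
        · exact fun hm => hfresh q c' (hpq ▸ h) (by simp [hm])
        · simp only [List.mem_singleton] at h; exact h ▸ hnd.1
      · rw [if_neg hpq] at hc'
        exact fun hm => hfresh p' c' hc' (by simp [hm])
    rw [hcd p]
    simp only [List.filter_cons]
    by_cases hpq : p = q
    · subst hpq
      simp
    · have : ((c, q).2 == p) = false := by simpa [beq_iff_eq] using fun h => hpq h.symm
      simp only [this, Bool.false_eq_true, if_neg, not_false_iff]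
      rw [if_neg hpq]

theorem pv_kids (po : List (String × String)) (p : String) :
    (pvCoOf po).getD p PySem.Set.empty
      = ((pvPd po).items.filter (fun cp => cp.2 == p)).map Prod.fst := by
  have hnd : ((pvPd po).items.map Prod.fst).Nodup := PySem.Dict.nodup_keys_ofList po
  have h := pv_childfold (pvPd po).items PySem.Dict.empty hnd
      (by intro p' c hc; rw [PySem.Dict.getD_empty] at hc; cases hc) p
  simpa [pvCoOf, pvChildrenOf, PySem.Dict.getD_empty] using h

theorem pv_kids_nodup (po : List (String × String)) (p : String) :
    ((pvCoOf po).getD p PySem.Set.empty).Nodup := by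
  rw [pv_kids]
  have hsub : (((pvPd po).items.filter (fun cp => cp.2 == p)).map Prod.fst).Sublist
      ((pvPd po).items.map Prod.fst) := List.filter_sublist.map Prod.fst
  exact hsub.nodup (PySem.Dict.nodup_keys_ofList po)

theorem pv_kids_rel (po : List (String × String)) {c p : String}
    (h : c ∈ (pvCoOf po).getD p PySem.Set.empty) : (pvPd po).get? c = some p := by
  rw [pv_kids] at h
  obtain ⟨cp, hmem, hfst⟩ := List.mem_map.mp h
  have hf := List.mem_filter.mp hmem
  have h2 : cp.2 = p := by simpa [beq_iff_eq] using hf.2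
  have : (c, p) ∈ (pvPd po).items := by
    have : cp = (c, p) := by cases cp; simp_all
    exact this ▸ hf.1
  exact PySem.Dict.get?_of_mem_items _ this (PySem.Dict.nodup_keys_ofList po)

theorem pv_pchain_mono (pd : PySem.Dict String String) :
    ∀ n m x y, n ≤ m → y ∈ pvPChain pd n x → y ∈ pvPChain pd m x := by
  intro n
  induction n with
  | zero => intro m x y _ hy; simp [pvPChain] at hy
  | succ k ih =>
    intro m x y hle hy
    obtain ⟨m', rfl⟩ : ∃ m', m = m' + 1 := ⟨m - 1, by omega⟩
    simp only [pvPChain] at hy ⊢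
    obtain hg | ⟨p, hg⟩ := Option.eq_none_or_eq_some (pd.get? x)
    · rw [hg] at hy; simp at hy
    · rw [hg] at hy ⊢
      simp only [List.mem_cons] at hy ⊢
      rcases hy with h | h
      · exact Or.inl h
      · exact Or.inr (ih m' p y (by omega) h)

theorem pv_linked_pchain (pd : PySem.Dict String String) :
    ∀ l x, pvLinked pd (x :: l) → pvPChain pd l.length x = l := by
  intro l
  induction l with
  | nil => intro x _; rfl
  | cons b tl ih =>
    intro x h
    obtain ⟨h1, h2⟩ := h
    simp only [List.length_cons, pvPChain, h1]
    exact congrArg (b :: ·) (ih b h2)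

theorem pv_pd_foldl (po : List (String × String)) :
    pvPd po = List.foldl (fun d (x : String × String) => d.insert x.1 x.2) PySem.Dict.empty po := rfl

theorem pv_keys_pd (po : List (String × String)) :
    (pvPd po).keys = PySem.Set.ofList (po.map Prod.fst) := by
  rw [pv_pd_foldl]
  have := PySem.Dict.keys_foldl_insert_key (ν := String) po (fun (x : String × String) => x.1)
      (fun _ x => x.2) PySem.Dict.empty
  rw [this, PySem.Dict.keys_empty, PySem.Set.update_nil_left]

theorem pv_mem_keys_pd (po : List (String × String)) {k : String}
    (h : k ∈ (pvPd po).keys) : k ∈ po.map Prod.fst := by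
  rw [pv_keys_pd] at h
  exact (PySem.Set.mem_ofList _ _).mp h

theorem pv_keys_len (po : List (String × String)) : (pvPd po).keys.length ≤ po.length := by
  rw [pv_keys_pd]
  calc (PySem.Set.ofList (po.map Prod.fst)).length ≤ (po.map Prod.fst).length :=
        PySem.Set.length_ofList_le _
    _ = po.length := List.length_map ..

theorem pv_mem_keys_of_get? (pd : PySem.Dict String String) {c p : String}
    (h : pd.get? c = some p) : c ∈ pd.keys := by
  rw [← PySem.Dict.contains_iff_mem_keys, PySem.Dict.contains_eq_isSome_get?, h]
  rfl

theorem pv_linked_dropLast (po : List (String × String)) :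
    ∀ l x, pvLinked (pvPd po) (x :: l) → ∀ y ∈ (x :: l).dropLast, y ∈ (pvPd po).keys := by
  intro l
  induction l with
  | nil => intro x _ y hy; simp at hy
  | cons b tl ih =>
    intro x h y hy
    obtain ⟨h1, h2⟩ := h
    rw [List.dropLast_cons₂] at hy
    rcases List.mem_cons.mp hy with rfl | hy'
    · exact pv_mem_keys_of_get? _ h1
    · exact ih b h2 y hy'

theorem pv_linked_len (po : List (String × String)) {t : String} {path : List String}
    (hnd : (t :: path).Nodup) (hl : pvLinked (pvPd po) (t :: path)) :
    path.length ≤ po.length := by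
  have hsub : (t :: path).dropLast ⊆ (pvPd po).keys :=
    fun y hy => pv_linked_dropLast po path t hl y hy
  have hnd' : (t :: path).dropLast.Nodup := (List.dropLast_sublist _).nodup hnd
  have hle := (List.subperm_of_subset hnd' hsub).length_le
  have hlen : (t :: path).dropLast.length = path.length := by
    simp [List.length_dropLast]
  have := pv_keys_len po
  omega

theorem pv_no_revisit (po : List (String × String))
    (hpre : ∀ cp ∈ po, cp.1 ∉ pvPChain (pvPd po) (po.length + 1) cp.1)
    {c t : String} {path : List String}
    (hrel : (pvPd po).get? c = some t) (hl : pvLinked (pvPd po) (t :: path))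
    (hnd : (t :: path).Nodup) (hc : c ∈ t :: path) : False := by
  have hl' : pvLinked (pvPd po) (c :: t :: path) := ⟨hrel, hl⟩
  have hchain := pv_linked_pchain (pvPd po) (t :: path) c hl'
  have hlen : path.length ≤ po.length := pv_linked_len po hnd hl
  have hmem : c ∈ pvPChain (pvPd po) (po.length + 1) c := by
    refine pv_pchain_mono (pvPd po) (t :: path).length (po.length + 1) c c ?_ ?_
    · simp only [List.length_cons]; omega
    · rw [hchain]; exact hc
  obtain ⟨cp, hcp, h1⟩ := List.mem_map.mp (pv_mem_keys_pd po (pv_mem_keys_of_get? _ hrel))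
  exact hpre cp hcp (h1 ▸ hmem)

theorem pv_descend_stable (po : List (String × String))
    (hpre : ∀ cp ∈ po, cp.1 ∉ pvPChain (pvPd po) (po.length + 1) cp.1) :
    ∀ f₁ f₂ t path, pvLinked (pvPd po) (t :: path) → (t :: path).Nodup →
      po.length + 1 ≤ f₁ + path.length → po.length + 1 ≤ f₂ + path.length →
      pvDescend (pvCoOf po) f₁ t = pvDescend (pvCoOf po) f₂ t := by
  intro f₁
  induction f₁ with
  | zero =>
    intro f₂ t path hl hnd h1 _
    have := pv_linked_len po hnd hl
    omega
  | succ k ih =>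
    intro f₂ t path hl hnd h1 h2
    obtain ⟨g, rfl⟩ : ∃ g, f₂ = g + 1 := ⟨f₂ - 1, by have := pv_linked_len po hnd hl; omega⟩
    simp only [pvDescend]
    apply PySem.List.foldl_congr_mem
    intro acc c hc
    have hrel := pv_kids_rel po hc
    have hnd' : (c :: t :: path).Nodup :=
      List.nodup_cons.mpr ⟨fun hm => pv_no_revisit po hpre hrel hl hnd hm, hnd⟩
    have heq := ih g c (t :: path) ⟨hrel, hl⟩ hnd'
      (by simp only [List.length_cons]; omega) (by simp only [List.length_cons]; omega)
    rw [heq]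

theorem pv_allChildren_spec (po : List (String × String))
    (hpre : ∀ cp ∈ po, cp.1 ∉ pvPChain (pvPd po) (po.length + 1) cp.1) :
    ∀ f t path memo, pvLinked (pvPd po) (t :: path) → (t :: path).Nodup →
      po.length + 1 ≤ f + path.length → pvGood po memo →
      (pvAllChildren (pvCoOf po) f t memo).1 = pvDescend (pvCoOf po) (po.length + 1) t
      ∧ pvGood po (pvAllChildren (pvCoOf po) f t memo).2
      ∧ (∀ k, memo.contains k = true → (pvAllChildren (pvCoOf po) f t memo).2.contains k = true)
      ∧ (pvAllChildren (pvCoOf po) f t memo).2.contains t = true := by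
  intro f
  induction f with
  | zero =>
    intro t path memo hl hnd h1 _
    have := pv_linked_len po hnd hl
    omega
  | succ k ih =>
    intro t path memo hl hnd h1 hg
    simp only [pvAllChildren]
    cases hget : memo.get? t with
    | some s =>
      refine ⟨hg t s hget, hg, fun k hk => hk, ?_⟩
      rw [PySem.Dict.contains_eq_isSome_get?, hget]; rfl
    | none =>
      have hofl : PySem.Set.ofList ((pvCoOf po).getD t PySem.Set.empty)
          = (pvCoOf po).getD t PySem.Set.empty :=
        PySem.Set.ofList_eq_self_of_nodup _ (pv_kids_nodup po t)
      -- inner loop invariant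
      have inner : ∀ (ks : List String), (∀ c ∈ ks, c ∈ (pvCoOf po).getD t PySem.Set.empty) →
          ∀ (acc : PySem.Set String × PySem.Dict String (PySem.Set String)), pvGood po acc.2 →
          (ks.foldl (fun acc c =>
              let r := pvAllChildren (pvCoOf po) k c acc.2
              (PySem.Set.update acc.1 r.1, r.2)) acc).1
            = ks.foldl (fun out c => PySem.Set.update out (pvDescend (pvCoOf po) (po.length + 1) c)) acc.1
          ∧ pvGood po (ks.foldl (fun acc c =>
              let r := pvAllChildren (pvCoOf po) k c acc.2
              (PySem.Set.update acc.1 r.1, r.2)) acc).2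
          ∧ (∀ kk, acc.2.contains kk = true → (ks.foldl (fun acc c =>
              let r := pvAllChildren (pvCoOf po) k c acc.2
              (PySem.Set.update acc.1 r.1, r.2)) acc).2.contains kk = true) := by
        intro ks
        induction ks with
        | nil => intro _ acc hacc; exact ⟨rfl, hacc, fun _ hk => hk⟩
        | cons c ks ihks =>
          intro hks acc hacc
          have hc : c ∈ (pvCoOf po).getD t PySem.Set.empty := hks c (by simp)
          have hrel := pv_kids_rel po hc
          have hnd' : (c :: t :: path).Nodup :=
            List.nodup_cons.mpr ⟨fun hm => pv_no_revisit po hpre hrel hl hnd hm, hnd⟩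
          obtain ⟨hr1, hr2, hr3, _⟩ := ih c (t :: path) acc.2 ⟨hrel, hl⟩ hnd'
            (by simp only [List.length_cons]; omega) hacc
          simp only [List.foldl_cons]
          obtain ⟨g1, g2, g3⟩ := ihks (fun c' hc' => hks c' (by simp [hc']))
            (PySem.Set.update acc.1 (pvAllChildren (pvCoOf po) k c acc.2).1,
              (pvAllChildren (pvCoOf po) k c acc.2).2) hr2
          refine ⟨?_, g2, fun kk hk => g3 kk (hr3 kk hk)⟩
          rw [g1, hr1]
      obtain ⟨i1, i2, i3⟩ := inner ((pvCoOf po).getD t PySem.Set.empty)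
        (fun _ h => h) (PySem.Set.ofList ((pvCoOf po).getD t PySem.Set.empty), memo)
        (by exact hg)
      rw [hofl] at i1 i2 i3
      have hdesc : pvDescend (pvCoOf po) (po.length + 1) t
          = ((pvCoOf po).getD t PySem.Set.empty).foldl
              (fun out c => PySem.Set.update out (pvDescend (pvCoOf po) (po.length + 1) c))
              ((pvCoOf po).getD t PySem.Set.empty) := by
        conv_lhs => simp only [pvDescend]
        rw [hofl]
        apply PySem.List.foldl_congr_mem
        intro acc c hc
        have hrel := pv_kids_rel po hc
        have hnd' : (c :: t :: path).Nodup :=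
          List.nodup_cons.mpr ⟨fun hm => pv_no_revisit po hpre hrel hl hnd hm, hnd⟩
        rw [pv_descend_stable po hpre po.length (po.length + 1) c (t :: path) ⟨hrel, hl⟩ hnd'
          (by simp only [List.length_cons]; omega) (by simp only [List.length_cons]; omega)]
      rw [hofl]
      constructor
      · rw [i1, ← hdesc]
      refine ⟨?_, ?_, PySem.Dict.contains_insert_self _ _ _⟩
      · intro kk v hv
        rw [PySem.Dict.get?_insert] at hv
        by_cases hkt : kk = t
        · rw [if_pos hkt] at hv
          cases hv
          rw [i1, ← hdesc, hkt]
        · rw [if_neg hkt] at hv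
          exact i2 kk v hv
      · intro kk hk
        rw [PySem.Dict.contains_insert]
        rw [i3 kk hk, Bool.or_true]

theorem pv_subtypes_spec (po : List (String × String))
    (hpre : ∀ cp ∈ po, cp.1 ∉ pvPChain (pvPd po) (po.length + 1) cp.1) :
    pvGood po (pvComputeSubtypes (pvPd po) (po.length + 1))
    ∧ ∀ kk, (pvCoOf po).contains kk = true →
        (pvComputeSubtypes (pvPd po) (po.length + 1)).contains kk = true := by
  have gen : ∀ (ks : List String) (memo : PySem.Dict String (PySem.Set String)), pvGood po memo →
      pvGood po (ks.foldl (fun memo t => (pvAllChildren (pvCoOf po) (po.length + 1) t memo).2) memo)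
      ∧ (∀ kk, memo.contains kk = true →
          (ks.foldl (fun memo t => (pvAllChildren (pvCoOf po) (po.length + 1) t memo).2) memo).contains kk = true)
      ∧ (∀ kk ∈ ks,
          (ks.foldl (fun memo t => (pvAllChildren (pvCoOf po) (po.length + 1) t memo).2) memo).contains kk = true) := by
    intro ks
    induction ks with
    | nil => intro memo hm; exact ⟨hm, fun _ hk => hk, by simp⟩
    | cons t ks ihks =>
      intro memo hm
      obtain ⟨h1, h2, h3, h4⟩ := pv_allChildren_spec po hpre (po.length + 1) t [] memo
        trivial (by simp) (by omega) hm
      obtain ⟨g1, g2, g3⟩ := ihks (pvAllChildren (pvCoOf po) (po.length + 1) t memo).2 h2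
      refine ⟨g1, fun kk hk => g2 kk (h3 kk hk), ?_⟩
      intro kk hkk
      rcases List.mem_cons.mp hkk with rfl | hkk'
      · exact g2 kk h4
      · exact g3 kk hkk'
  obtain ⟨g1, _, g3⟩ := gen (pvCoOf po).keys PySem.Dict.empty
    (by intro k v hv; rw [PySem.Dict.get?_empty] at hv; cases hv)
  exact ⟨g1, fun kk hk => g3 kk ((PySem.Dict.contains_iff_mem_keys _ _).mp hk)⟩

theorem pv_double_fold (ch attrs : List String) (pr : String → String → Bool) (acc : List (String × String)) :
    ch.foldl (fun acc2 child => attrs.foldl (fun acc3 attr =>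
        if pr child attr then acc3 ++ [(child, attr)] else acc3) acc2) acc
      = acc ++ ch.flatMap (fun child => (attrs.filter (pr child)).map (fun attr => (child, attr))) := by
  have hf : (fun (acc2 : List (String × String)) (child : String) => attrs.foldl (fun acc3 attr =>
      if pr child attr then acc3 ++ [(child, attr)] else acc3) acc2)
      = fun acc2 child => acc2 ++ (attrs.filter (pr child)).map (fun attr => (child, attr)) := by
    funext acc2 child
    exact PySem.List.foldl_append_if (pr child) (fun attr => (child, attr)) attrs acc2
  rw [hf, PySem.List.foldl_append_eq_flatMap]

theorem pv_descend_empty (po : List (String × String)) {s : String}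
    (h : (pvCoOf po).contains s = false) :
    pvDescend (pvCoOf po) (po.length + 1) s = [] := by
  have hk : (pvCoOf po).getD s PySem.Set.empty = PySem.Set.empty :=
    PySem.Dict.getD_of_not_contains _ _ h
  simp only [pvDescend, hk]
  rfl

theorem pv_emit_eq (po : List (String × String))
    (hpre : ∀ cp ∈ po, cp.1 ∉ pvPChain (pvPd po) (po.length + 1) cp.1)
    (dct : PySem.Dict String (List String)) :
    dct.items.foldl (fun acc sp =>
        if (pvComputeSubtypes (pvPd po) (po.length + 1)).contains sp.1 then
          ((pvComputeSubtypes (pvPd po) (po.length + 1)).getD sp.1 PySem.Set.empty).foldl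
            (fun acc2 child => sp.2.foldl (fun acc3 attr =>
              if (dct.getD child PySem.Set.empty).contains attr then acc3 ++ [(child, attr)]
              else acc3) acc2) acc
        else acc) []
      = dct.items.flatMap (fun sp =>
          (pvDescend (pvCoOf po) (po.length + 1) sp.1).flatMap (fun child =>
            (sp.2.filter (fun attr => (dct.getD child PySem.Set.empty).contains attr)).map
              (fun attr => (child, attr)))) := by
  obtain ⟨hgood, hcont⟩ := pv_subtypes_spec po hpre
  have hstep : ∀ (acc : List (String × String)) (sp : String × List String),
      (if (pvComputeSubtypes (pvPd po) (po.length + 1)).contains sp.1 then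
          ((pvComputeSubtypes (pvPd po) (po.length + 1)).getD sp.1 PySem.Set.empty).foldl
            (fun acc2 child => sp.2.foldl (fun acc3 attr =>
              if (dct.getD child PySem.Set.empty).contains attr then acc3 ++ [(child, attr)]
              else acc3) acc2) acc
        else acc)
      = acc ++ (pvDescend (pvCoOf po) (po.length + 1) sp.1).flatMap (fun child =>
          (sp.2.filter (fun attr => (dct.getD child PySem.Set.empty).contains attr)).map
            (fun attr => (child, attr))) := by
    intro acc sp
    by_cases hcs : (pvComputeSubtypes (pvPd po) (po.length + 1)).contains sp.1 = true
    · rw [if_pos hcs]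
      have hgd : (pvComputeSubtypes (pvPd po) (po.length + 1)).getD sp.1 PySem.Set.empty
          = pvDescend (pvCoOf po) (po.length + 1) sp.1 := by
        cases hg : (pvComputeSubtypes (pvPd po) (po.length + 1)).get? sp.1 with
        | none => rw [PySem.Dict.contains_eq_isSome_get?, hg] at hcs; simp at hcs
        | some v =>
          rw [PySem.Dict.getD_eq_get?_getD, hg]
          exact hgood sp.1 v hg
      rw [hgd, pv_double_fold]
    · rw [if_neg hcs]
      have hco : (pvCoOf po).contains sp.1 = false := by
        cases hb : (pvCoOf po).contains sp.1 with
        | false => rfl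
        | true => exact absurd (hcont sp.1 hb) hcs
      rw [pv_descend_empty po hco]
      simp
  rw [PySem.List.foldl_congr_mem _ _
      (fun acc sp => acc ++ (pvDescend (pvCoOf po) (po.length + 1) sp.1).flatMap (fun child =>
        (sp.2.filter (fun attr => (dct.getD child PySem.Set.empty).contains attr)).map
          (fun attr => (child, attr)))) []
      (fun acc sp _ => hstep acc sp),
    PySem.List.foldl_append_eq_flatMap]
  simp

theorem pv_main (parent_of : List (String × String)) (owns_of : List (String × List String)) (plays_of : List (String × List String)) (hpre : Pre_plan_auto_migrations parent_of owns_of plays_of) :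
    plan_auto_migrations parent_of owns_of plays_of = plan_auto_migrations_alt parent_of owns_of plays_of := by
  unfold Pre_plan_auto_migrations at hpre
  show (_, _) = (_, _)
  refine Prod.ext ?_ ?_
  · exact pv_emit_eq parent_of hpre (PySem.Dict.ofList owns_of)
  · exact pv_emit_eq parent_of hpre (PySem.Dict.ofList plays_of)

-- ===== VERDICT (by name: the statement is the Claim_ definition above) =====
theorem plan_auto_migrations_spec : Claim_equal_plan_auto_migrations := by
  intro parent_of owns_of plays_of _ hpre
  exact pv_main parent_of owns_of plays_of hpre
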